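-- pv_equiv track=rewrite | github.com/AbeVallerian/CsCourses | AlgorithmicToolbox/week2/fibonacci_partial_sum.py | sum_per_cycle
-- ===== SOURCE A (Python) =====
-- def sum_per_cycle(cycle: int, m: int) -> int:
--     if cycle <= 1:
--         return cycle
--
--     a0: int = 0
--     a1: int = 1
--     sum_last_digit: int = 1
--     for _ in range(2, cycle + 1):
--         tmp: int = (a0 + a1) % m
--         a0 = a1
--         a1 = tmp
--         sum_last_digit = (sum_last_digit + a1) % m
--
--     return sum_last_digit
-- ===== SOURCE B (Python) =====
-- def sum_per_cycle(cycle: int, m: int) -> int: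
--     if cycle <= 1:
--         return cycle
--
--     def fib_pair(n: int):
--         # (F_n % m, F_{n+1} % m) by fast doubling
--         if n == 0:
--             return (0 % m, 1 % m)
--         a, b = fib_pair(n // 2)
--         c = (a * (2 * b - a)) % m
--         d = (a * a + b * b) % m
--         if n % 2 == 1:
--             return (d, (c + d) % m)
--         return (c, d)
--
--     f, _ = fib_pair(cycle + 2)
--     return (f - 1) % m
-- ===== Notes on version B (the rewrite author's own statement) =====
-- stated objective: faster
-- what changed: replaced the O(cycle) iterative Fibonacci summation loop by fast-doubling Fibonacci computation of F_{cycle+2} mod m and the identity sum(F_1..F_n) = F_{n+2} - 1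
import Mathlib
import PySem

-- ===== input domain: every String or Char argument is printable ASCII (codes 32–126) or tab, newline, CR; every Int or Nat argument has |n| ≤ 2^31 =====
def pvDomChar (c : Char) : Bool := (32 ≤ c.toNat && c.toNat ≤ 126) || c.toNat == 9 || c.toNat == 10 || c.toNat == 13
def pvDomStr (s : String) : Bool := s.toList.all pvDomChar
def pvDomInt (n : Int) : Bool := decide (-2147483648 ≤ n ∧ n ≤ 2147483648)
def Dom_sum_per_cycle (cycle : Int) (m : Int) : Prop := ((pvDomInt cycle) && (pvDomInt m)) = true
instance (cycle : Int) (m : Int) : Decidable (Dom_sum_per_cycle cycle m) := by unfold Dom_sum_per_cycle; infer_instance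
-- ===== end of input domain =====

-- B replaces A's O(cycle) Fibonacci-summing loop by O(log cycle) fast doubling with sum(F_1..F_n) = F_{n+2} - 1, all mod m.

-- ===== PORT A =====
-- loop body of A's for-loop (tmp = (a0+a1) % m; a0,a1 = a1,tmp; sum = (sum+tmp) % m), state (a0, a1, sum_last_digit)
def stepA (m : Int) (st : Int × Int × Int) : Int × Int × Int :=
  let tmp := PySem.Int.mod (st.1 + st.2.1) m
  (st.2.1, tmp, PySem.Int.mod (st.2.2 + tmp) m)

def sum_per_cycle (cycle : Int) (m : Int) : Int :=
  if cycle ≤ 1 then cycle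
  else
    let st := (PySem.List.pyRange 2 (cycle + 1) 1).foldl (fun st _ => stepA m st) (0, 1, 1)
    st.2.2

-- ===== PORT B =====
-- fib_pair(n): (F_n % m, F_{n+1} % m) by fast doubling (recursion on n // 2)
def fibPairAlt (m : Int) : Nat → Int × Int
  | 0 => (PySem.Int.mod 0 m, PySem.Int.mod 1 m)
  | (n+1) =>
    let p := fibPairAlt m ((n+1) / 2)
    let a := p.1
    let b := p.2
    let c := PySem.Int.mod (a * (2 * b - a)) m
    let d := PySem.Int.mod (a * a + b * b) m
    if (n+1) % 2 = 1 then (d, PySem.Int.mod (c + d) m) else (c, d)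
  decreasing_by omega

def sum_per_cycle_alt (cycle : Int) (m : Int) : Int :=
  if cycle ≤ 1 then cycle
  else PySem.Int.mod ((fibPairAlt m (cycle + 2).toNat).1 - 1) m

-- ===== PRECONDITION & SPEC =====
-- Pre_ excludes exactly the inputs where A raises ZeroDivisionError (m = 0 with cycle ≥ 2); B raises there too.
def Pre_sum_per_cycle (cycle : Int) (m : Int) : Prop := cycle ≤ 1 ∨ m ≠ 0
instance (cycle : Int) (m : Int) : Decidable (Pre_sum_per_cycle cycle m) := by unfold Pre_sum_per_cycle; infer_instance
def pvWitness_sum_per_cycle : Int × Int := (10, 3)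

def Spec_sum_per_cycle (cycle : Int) (m : Int) (out : Int) : Prop := out = sum_per_cycle_alt cycle m
instance (cycle : Int) (m : Int) (out : Int) : Decidable (Spec_sum_per_cycle cycle m out) := by unfold Spec_sum_per_cycle; infer_instance

-- ===== CLAIM (what is proved, stated in full; the proofs are below) =====
def Claim_equal_sum_per_cycle : Prop := ∀ (cycle : Int) (m : Int), Dom_sum_per_cycle cycle m → Pre_sum_per_cycle cycle m → Spec_sum_per_cycle cycle m (sum_per_cycle cycle m)

-- ===== LEMMAS AND PROOFS =====

-- Python % with the same nonzero divisor agrees on congruent arguments.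
lemma pymod_modeq (m x : Int) : PySem.Int.mod x m ≡ x [ZMOD m] := by
  have h := PySem.Int.floordiv_mul_add_mod x m
  rw [Int.modEq_iff_dvd]
  exact ⟨PySem.Int.floordiv x m, by linarith [mul_comm (PySem.Int.floordiv x m) m]⟩

lemma pymod_eq_pymod (m a b : Int) (hm : m ≠ 0) (h : a % m = b % m) :
    PySem.Int.mod a m = PySem.Int.mod b m := by
  have hab : a ≡ b [ZMOD m] := h
  have h1 : PySem.Int.mod a m ≡ PySem.Int.mod b m [ZMOD m] :=
    ((pymod_modeq m a).trans hab).trans (pymod_modeq m b).symm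
  have hd : m ∣ PySem.Int.mod b m - PySem.Int.mod a m := Int.modEq_iff_dvd.mp h1
  have hd' : |m| ∣ PySem.Int.mod b m - PySem.Int.mod a m := (abs_dvd m _).mpr hd
  have habs : |PySem.Int.mod b m - PySem.Int.mod a m| < |m| := by
    rcases lt_or_gt_of_ne hm with hneg | hpos
    · obtain ⟨l1, u1⟩ := PySem.Int.mod_neg_bounds a hneg
      obtain ⟨l2, u2⟩ := PySem.Int.mod_neg_bounds b hneg
      rw [abs_of_neg hneg, abs_lt]; omega
    · have l1 := PySem.Int.mod_nonneg a hpos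
      have u1 := PySem.Int.mod_lt a hpos
      have l2 := PySem.Int.mod_nonneg b hpos
      have u2 := PySem.Int.mod_lt b hpos
      rw [abs_of_pos hpos, abs_lt]; omega
  have := Int.eq_zero_of_abs_lt_dvd hd' habs
  omega

lemma fib_two_mul_int (n : Nat) :
    (Nat.fib (2 * n) : Int) = (Nat.fib n : Int) * (2 * (Nat.fib (n+1) : Int) - (Nat.fib n : Int)) := by
  have h : Nat.fib n ≤ 2 * Nat.fib (n+1) := le_trans Nat.fib_le_fib_succ (by omega)
  rw [Nat.fib_two_mul, Nat.cast_mul, Nat.cast_sub h]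
  push_cast
  ring

lemma fib_two_mul_add_one_int (n : Nat) :
    (Nat.fib (2 * n + 1) : Int) = (Nat.fib n : Int) * (Nat.fib n : Int) + (Nat.fib (n+1) : Int) * (Nat.fib (n+1) : Int) := by
  rw [Nat.fib_two_mul_add_one]
  push_cast
  ring

lemma fibPairAlt_modeq (m : Int) (n : Nat) :
    (fibPairAlt m n).1 ≡ (Nat.fib n : Int) [ZMOD m] ∧ (fibPairAlt m n).2 ≡ (Nat.fib (n+1) : Int) [ZMOD m] := by
  induction n using Nat.strong_induction_on with
  | _ n ih =>
  match n with
  | 0 =>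
    constructor
    · simpa [fibPairAlt] using pymod_modeq m 0
    · simpa [fibPairAlt] using pymod_modeq m 1
  | (k+1) =>
    obtain ⟨ha, hb⟩ := ih ((k+1)/2) (by omega)
    have hc : PySem.Int.mod ((fibPairAlt m ((k+1)/2)).1 * (2 * (fibPairAlt m ((k+1)/2)).2 - (fibPairAlt m ((k+1)/2)).1)) m
        ≡ (Nat.fib (2 * ((k+1)/2)) : Int) [ZMOD m] :=
      (pymod_modeq m _).trans (by rw [fib_two_mul_int]; exact ha.mul ((Int.ModEq.mul_left 2 hb).sub ha))
    have hd : PySem.Int.mod ((fibPairAlt m ((k+1)/2)).1 * (fibPairAlt m ((k+1)/2)).1 + (fibPairAlt m ((k+1)/2)).2 * (fibPairAlt m ((k+1)/2)).2) m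
        ≡ (Nat.fib (2 * ((k+1)/2) + 1) : Int) [ZMOD m] :=
      (pymod_modeq m _).trans (by rw [fib_two_mul_add_one_int]; exact (ha.mul ha).add (hb.mul hb))
    by_cases hp : (k+1) % 2 = 1
    · have h1 : 2 * ((k+1)/2) + 1 = k + 1 := by omega
      have h2 : (2 * ((k+1)/2)) + 2 = k + 2 := by omega
      have hsum : (Nat.fib (2*((k+1)/2)) : Int) + (Nat.fib (2*((k+1)/2)+1) : Int) = (Nat.fib (k+2) : Int) := by
        rw [← h2, Nat.fib_add_two]; push_cast; ring
      constructor
      · simp only [fibPairAlt, hp, if_pos]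
        simpa [h1] using hd
      · simp only [fibPairAlt, hp, if_pos]
        exact (pymod_modeq m _).trans (by rw [show ((k+1:Nat)+1) = k+2 from rfl, ← hsum]; exact hc.add hd)
    · have hp0 : (k+1) % 2 = 0 := by omega
      have h1 : 2 * ((k+1)/2) = k + 1 := by omega
      have h2 : 2 * ((k+1)/2) + 1 = k + 2 := by omega
      constructor
      · simp only [fibPairAlt, hp0]
        simpa [h1] using hc
      · simp only [fibPairAlt, hp0]
        simpa [h2] using hd

lemma foldl_const_iterate {α β : Type} (f : α → α) (l : List β) (init : α) :
    l.foldl (fun st _ => f st) init = f^[l.length] init := by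
  induction l generalizing init with
  | nil => rfl
  | cons x xs ih => simp [List.foldl_cons, Function.iterate_succ_apply, ih]

lemma pyRange_one_length (a b : Int) : (PySem.List.pyRange a b 1).length = (b - a).toNat := by
  obtain ⟨n, hn⟩ : ∃ n : Nat, (b - a).toNat = n := ⟨_, rfl⟩
  induction n generalizing a with
  | zero =>
    have he : PySem.List.pyRange a b 1 = [] := by
      simp [PySem.List.pyRange]; omega
    rw [he]; simp; omega
  | succ k ih =>
    have hab : a < b := by omega
    rw [PySem.List.pyRange_one_cons hab]
    simp only [List.length_cons, ih (a+1) (by omega)]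
    omega

lemma stepA_iter_modeq (m : Int) (k : Nat) :
    ((stepA m)^[k] (0, 1, 1)).1 ≡ (Nat.fib k : Int) [ZMOD m] ∧
    ((stepA m)^[k] (0, 1, 1)).2.1 ≡ (Nat.fib (k+1) : Int) [ZMOD m] ∧
    ((stepA m)^[k] (0, 1, 1)).2.2 ≡ (Nat.fib (k+3) : Int) - 1 [ZMOD m] := by
  induction k with
  | zero =>
    exact ⟨rfl, rfl, by
      have h3 : (Nat.fib 3 : Int) - 1 = 1 := by norm_num [show Nat.fib 3 = 2 from rfl]
      rw [h3]
      exact Int.ModEq.refl 1⟩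
  | succ k ih =>
    obtain ⟨h1, h2, h3⟩ := ih
    rw [Function.iterate_succ_apply']
    have hf2 : (Nat.fib (k+2) : Int) = (Nat.fib k : Int) + (Nat.fib (k+1) : Int) := by
      rw [Nat.fib_add_two]; push_cast; ring
    have htmp : PySem.Int.mod (((stepA m)^[k] (0,1,1)).1 + ((stepA m)^[k] (0,1,1)).2.1) m
        ≡ (Nat.fib (k+2) : Int) [ZMOD m] :=
      (pymod_modeq m _).trans (by rw [hf2]; exact h1.add h2)
    refine ⟨?_, ?_, ?_⟩
    · simpa [stepA] using h2
    · simpa [stepA] using htmp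
    · have hf4 : (Nat.fib (k+4) : Int) - 1 = ((Nat.fib (k+3) : Int) - 1) + (Nat.fib (k+2) : Int) := by
        rw [show (k+4) = (k+2)+2 from rfl, Nat.fib_add_two]; push_cast; ring
      simp only [stepA]
      exact (pymod_modeq m _).trans (by rw [show (k+1+3) = k+4 from rfl, hf4]; exact h3.add htmp)

-- ===== VERDICT (by name: the statement is the Claim_ definition above) =====
theorem sum_per_cycle_spec : Claim_equal_sum_per_cycle := by
  intro cycle m hdom hpre
  unfold Spec_sum_per_cycle
  by_cases hc : cycle ≤ 1
  · simp [sum_per_cycle, sum_per_cycle_alt, hc]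
  · have hm : m ≠ 0 := by
      rcases hpre with h | h
      · exact absurd h hc
      · exact h
    obtain ⟨N, hN⟩ : ∃ N : Nat, (cycle + 1 - 2).toNat = N + 1 := ⟨(cycle - 2).toNat, by omega⟩
    have hA : sum_per_cycle cycle m = ((stepA m)^[N+1] (0,1,1)).2.2 := by
      simp only [sum_per_cycle, if_neg hc]
      rw [foldl_const_iterate, pyRange_one_length, show (cycle + 1 - 2) = cycle - 1 from by ring, show (cycle - 1).toNat = N + 1 from by omega]
    have hinv := (stepA_iter_modeq m (N+1)).2.2
    have hAmod : ((stepA m)^[N+1] (0,1,1)).2.2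
        = PySem.Int.mod (((stepA m)^[N] (0,1,1)).2.2 + PySem.Int.mod (((stepA m)^[N] (0,1,1)).1 + ((stepA m)^[N] (0,1,1)).2.1) m) m := by
      rw [Function.iterate_succ_apply']
      rfl
    have hB := (fibPairAlt_modeq m ((cycle+2).toNat)).1
    have hidx : (cycle + 2).toNat = N + 4 := by omega
    rw [hA, hAmod]
    simp only [sum_per_cycle_alt, if_neg hc]
    rw [hidx]
    apply pymod_eq_pymod m _ _ hm
    have hw : (((stepA m)^[N] (0,1,1)).2.2 + PySem.Int.mod (((stepA m)^[N] (0,1,1)).1 + ((stepA m)^[N] (0,1,1)).2.1) m)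
        ≡ (Nat.fib (N+4) : Int) - 1 [ZMOD m] := by
      have := hAmod ▸ hinv
      exact (pymod_modeq m _).symm.trans (by simpa [show (N+1+3) = N+4 from rfl] using this)
    have hv : ((fibPairAlt m (N+4)).1 - 1) ≡ (Nat.fib (N+4) : Int) - 1 [ZMOD m] := by
      rw [hidx] at hB
      exact hB.sub_right 1
    exact hw.trans hv.symm
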